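-- pv_equiv track=rewrite | github.com/colin-whittaker/aoc2022 | d17.py | grid_cache_key
-- ===== SOURCE A (Python) =====
-- def grid_cache_key(grid,max_y):
--     key = []
--     for x in range(7):
--         for y in range(max_y,0,-1):
--             if (x,y) in grid:
--                 key.append(str(max_y-y))
--                 break
--     return ','.join(key)
-- ===== SOURCE B (Python) =====
-- def grid_cache_key(grid, max_y):
--     col_top = {}
--     for (x, y) in grid:
--         if 0 <= x < 7 and 1 <= y <= max_y and (x not in col_top or y > col_top[x]):
--             col_top[x] = y
--     return ','.join(str(max_y - col_top[x]) for x in range(7) if x in col_top)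
-- ===== Notes on version B (the rewrite author's own statement) =====
-- stated objective: faster
-- what changed: Replaces seven top-down membership scans (each testing (x,y) in grid for every y) with a single pass over grid that records the per-column maximum qualifying y in a dict, then emits the key from the dict.
import Mathlib
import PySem

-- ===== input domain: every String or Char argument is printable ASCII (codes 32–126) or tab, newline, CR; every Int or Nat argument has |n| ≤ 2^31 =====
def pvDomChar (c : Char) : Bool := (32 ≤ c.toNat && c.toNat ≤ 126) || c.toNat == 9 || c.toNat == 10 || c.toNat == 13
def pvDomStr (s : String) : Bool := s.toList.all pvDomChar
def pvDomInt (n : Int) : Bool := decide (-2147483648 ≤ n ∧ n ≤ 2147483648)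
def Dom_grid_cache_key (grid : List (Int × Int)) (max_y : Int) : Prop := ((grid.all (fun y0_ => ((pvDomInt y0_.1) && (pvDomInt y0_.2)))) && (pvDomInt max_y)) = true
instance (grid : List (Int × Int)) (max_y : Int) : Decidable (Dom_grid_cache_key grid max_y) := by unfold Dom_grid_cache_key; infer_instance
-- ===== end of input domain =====

-- B builds the per-column top cell in one pass over the grid instead of A's seven top-down membership scans.

-- ===== PORT A =====
-- the inner 'for y in range(max_y,0,-1): if (x,y) in grid: … break' loop, returning the y it breaks on
def pvAFind (grid : List (Int × Int)) (x : Int) : List Int → Option Int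
  | [] => none
  | y :: ys => if (x, y) ∈ grid then some y else pvAFind grid x ys

def grid_cache_key (grid : List (Int × Int)) (max_y : Int) : String :=
  let key := (PySem.List.pyRange 0 7 1).foldl (fun key x =>
    match pvAFind grid x (PySem.List.pyRange max_y 0 (-1)) with
    | some y => key ++ [PySem.Int.toStr (max_y - y)]
    | none => key) []
  PySem.Str.join "," key

-- ===== PORT B =====
def pvColTop (grid : List (Int × Int)) (max_y : Int) : PySem.Dict Int Int :=
  grid.foldl (fun (d : PySem.Dict Int Int) (p : Int × Int) =>
    if (decide (0 ≤ p.1) && decide (p.1 < 7) && decide (1 ≤ p.2) && decide (p.2 ≤ max_y) &&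
        (match d.get? p.1 with | none => true | some c => decide (c < p.2)))
    then d.insert p.1 p.2 else d) (PySem.Dict.empty : PySem.Dict Int Int)

def grid_cache_key_alt (grid : List (Int × Int)) (max_y : Int) : String :=
  let col_top := pvColTop grid max_y
  PySem.Str.join "," ((PySem.List.pyRange 0 7 1).filterMap
    (fun x => (col_top.get? x).map (fun t => PySem.Int.toStr (max_y - t))))

-- ===== PRECONDITION & SPEC =====
def Spec_grid_cache_key (grid : List (Int × Int)) (max_y : Int) (out : String) : Prop := out = grid_cache_key_alt grid max_y
instance (grid : List (Int × Int)) (max_y : Int) (out : String) : Decidable (Spec_grid_cache_key grid max_y out) := by unfold Spec_grid_cache_key; infer_instance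

-- ===== CLAIM (what is proved, stated in full; the proofs are below) =====
def Claim_equal_grid_cache_key : Prop := ∀ (grid : List (Int × Int)) (max_y : Int), Dom_grid_cache_key grid max_y → Spec_grid_cache_key grid max_y (grid_cache_key grid max_y)

-- ===== LEMMAS AND PROOFS =====

-- "o is the top occupied cell of column x" (maximum qualifying y, none if the column is empty)
def pvIsBest (grid : List (Int × Int)) (max_y x : Int) (o : Option Int) : Prop :=
  (o = none ∧ ∀ y, (x, y) ∈ grid → 1 ≤ y → y ≤ max_y → False) ∨
  (∃ m, o = some m ∧ (x, m) ∈ grid ∧ 1 ≤ m ∧ m ≤ max_y ∧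
    ∀ y, (x, y) ∈ grid → 1 ≤ y → y ≤ max_y → y ≤ m)

theorem pvIsBest_unique (grid : List (Int × Int)) (max_y x : Int) (o o' : Option Int)
    (h : pvIsBest grid max_y x o) (h' : pvIsBest grid max_y x o') : o = o' := by
  rcases h with ⟨ho, hn⟩ | ⟨m, ho, hm, h1, h2, hmax⟩ <;>
    rcases h' with ⟨ho', hn'⟩ | ⟨m', ho', hm', h1', h2', hmax'⟩
  · rw [ho, ho']
  · exact absurd (hn _ hm' h1' h2') (fun h => h)
  · exact absurd (hn' _ hm h1 h2) (fun h => h)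
  · rw [ho, ho']
    have := hmax _ hm' h1' h2'
    have := hmax' _ hm h1 h2
    simp; omega

-- A's inner scan over range(a,0,-1) finds exactly the maximum occupied y in (0, a]
theorem pvAFind_best (grid : List (Int × Int)) (x : Int) :
    ∀ (n : Nat) (a : Int), a.toNat = n →
    (pvAFind grid x (PySem.List.pyRange a 0 (-1)) = none ∧
        ∀ y, (x, y) ∈ grid → 1 ≤ y → y ≤ a → False) ∨
    (∃ m, pvAFind grid x (PySem.List.pyRange a 0 (-1)) = some m ∧ (x, m) ∈ grid ∧ 1 ≤ m ∧ m ≤ a ∧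
        ∀ y, (x, y) ∈ grid → 1 ≤ y → y ≤ a → y ≤ m) := by
  intro n
  induction n with
  | zero =>
    intro a ha
    have hle : a ≤ 0 := by omega
    rw [PySem.List.pyRange_neg_one_eq_nil hle]
    exact Or.inl ⟨rfl, fun y _ h1 h2 => by omega⟩
  | succ k ih =>
    intro a ha
    have hpos : 0 < a := by omega
    rw [PySem.List.pyRange_neg_one_cons hpos]
    by_cases hmem : (x, a) ∈ grid
    · refine Or.inr ⟨a, ?_, hmem, by omega, le_refl a, fun y _ _ hy => hy⟩
      simp [pvAFind, hmem]
    · have := ih (a - 1) (by omega)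
      have hstep : pvAFind grid x ((a : Int) :: PySem.List.pyRange (a - 1) 0 (-1)) =
          pvAFind grid x (PySem.List.pyRange (a - 1) 0 (-1)) := by
        simp [pvAFind, hmem]
      rw [hstep]
      rcases this with ⟨ho, hn⟩ | ⟨m, ho, hm, h1, h2, hmax⟩
      · refine Or.inl ⟨ho, fun y hy h1 h2 => ?_⟩
        rcases lt_or_ge y a with h | h
        · exact hn y hy h1 (by omega)
        · have : y = a := by omega
          exact hmem (this ▸ hy)
      · refine Or.inr ⟨m, ho, hm, h1, by omega, fun y hy hy1 hy2 => ?_⟩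
        rcases lt_or_ge y a with h | h
        · exact hmax y hy hy1 (by omega)
        · have : y = a := by omega
          exact absurd (this ▸ hy) hmem

-- B's one-pass dict holds, at each column 0 ≤ x < 7, exactly the maximum qualifying y
theorem pvColTop_best (max_y x : Int) (hx0 : 0 ≤ x) (hx7 : x < 7) :
    ∀ (grid : List (Int × Int)), pvIsBest grid max_y x ((pvColTop grid max_y).get? x) := by
  intro grid
  induction grid using List.reverseRecOn with
  | nil =>
    exact Or.inl ⟨by simp [pvColTop], by simp⟩
  | append_singleton l p ih =>
    have hfold : pvColTop (l ++ [p]) max_y =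
        (if (decide (0 ≤ p.1) && decide (p.1 < 7) && decide (1 ≤ p.2) && decide (p.2 ≤ max_y) &&
            (match (pvColTop l max_y).get? p.1 with | none => true | some c => decide (c < p.2)))
         then (pvColTop l max_y).insert p.1 p.2 else pvColTop l max_y) := by
      simp [pvColTop]
    by_cases hpx : p.1 = x
    · -- same column
      by_cases hb : 1 ≤ p.2 ∧ p.2 ≤ max_y
      · rcases ih with ⟨ho, hn⟩ | ⟨m, ho, hm, h1, h2, hmax⟩
        · -- column was empty: condition fires, new top is p.2
          have hc : (decide (0 ≤ p.1) && decide (p.1 < 7) && decide (1 ≤ p.2) && decide (p.2 ≤ max_y) &&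
              (match (pvColTop l max_y).get? p.1 with | none => true | some c => decide (c < p.2))) = true := by
            rw [hpx, ho]; simp; omega
          rw [hfold, if_pos hc]
          refine Or.inr ⟨p.2, ?_, ?_, hb.1, hb.2, ?_⟩
          · rw [hpx]; simp [PySem.Dict.get?_insert_self]
          · simp [← hpx]
          · intro y hy h1 h2
            rcases List.mem_append.mp hy with h | h
            · exact (hn y h h1 h2).elim
            · have hpe : (x, y) = p := List.mem_singleton.mp h
              have : p.2 = y := by rw [← hpe]
              omega
        · by_cases hlt : m < p.2
          · -- strictly higher: condition fires
            have hc : (decide (0 ≤ p.1) && decide (p.1 < 7) && decide (1 ≤ p.2) && decide (p.2 ≤ max_y) &&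
                (match (pvColTop l max_y).get? p.1 with | none => true | some c => decide (c < p.2))) = true := by
              rw [hpx, ho]; simp; omega
            rw [hfold, if_pos hc]
            refine Or.inr ⟨p.2, ?_, ?_, hb.1, hb.2, ?_⟩
            · rw [hpx]; simp [PySem.Dict.get?_insert_self]
            · simp [← hpx]
            · intro y hy h1 h2
              rcases List.mem_append.mp hy with h | h
              · have := hmax y h h1 h2; omega
              · have hpe : (x, y) = p := List.mem_singleton.mp h
                have : p.2 = y := by rw [← hpe]
                omega
          · -- not higher: condition is false, old top still best
            have hc : (decide (0 ≤ p.1) && decide (p.1 < 7) && decide (1 ≤ p.2) && decide (p.2 ≤ max_y) &&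
                (match (pvColTop l max_y).get? p.1 with | none => true | some c => decide (c < p.2))) = false := by
              rw [hpx, ho]; simp; omega
            rw [hfold, if_neg (by simp [hc])]
            refine Or.inr ⟨m, ho, List.mem_append_left _ hm, h1, h2, ?_⟩
            intro y hy hy1 hy2
            rcases List.mem_append.mp hy with h | h
            · exact hmax y h hy1 hy2
            · have hpe : (x, y) = p := List.mem_singleton.mp h
              have : p.2 = y := by rw [← hpe]
              omega
      · -- y out of bounds: condition is false, nothing qualifying added
        have hc : (decide (0 ≤ p.1) && decide (p.1 < 7) && decide (1 ≤ p.2) && decide (p.2 ≤ max_y) &&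
            (match (pvColTop l max_y).get? p.1 with | none => true | some c => decide (c < p.2))) = false := by
          have : ¬ (1 ≤ p.2 ∧ p.2 ≤ max_y) := hb
          simp; omega
        rw [hfold, if_neg (by simp [hc])]
        rcases ih with ⟨ho, hn⟩ | ⟨m, ho, hm, h1, h2, hmax⟩
        · refine Or.inl ⟨ho, fun y hy h1 h2 => ?_⟩
          rcases List.mem_append.mp hy with h | h
          · exact hn y h h1 h2
          · have hpe : (x, y) = p := List.mem_singleton.mp h
            have : p.2 = y := by rw [← hpe]
            exact hb (by omega)
        · refine Or.inr ⟨m, ho, List.mem_append_left _ hm, h1, h2, ?_⟩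
          intro y hy hy1 hy2
          rcases List.mem_append.mp hy with h | h
          · exact hmax y h hy1 hy2
          · have hpe : (x, y) = p := List.mem_singleton.mp h
            have : p.2 = y := by rw [← hpe]
            exact absurd (by omega : 1 ≤ p.2 ∧ p.2 ≤ max_y) hb
    · -- other column: lookup at x unaffected
      have hget : (pvColTop (l ++ [p]) max_y).get? x = (pvColTop l max_y).get? x := by
        rw [hfold]
        split_ifs with h
        · exact PySem.Dict.get?_insert_of_ne _ _ (fun he => (hpx he.symm).elim)
        · rfl
      have hmemiff : ∀ y, (x, y) ∈ l ++ [p] ↔ (x, y) ∈ l := by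
        intro y
        constructor
        · intro hy
          rcases List.mem_append.mp hy with h | h
          · exact h
          · have hpe : (x, y) = p := List.mem_singleton.mp h
            exact absurd (by rw [← hpe]) hpx
        · exact List.mem_append_left _
      rw [hget]
      rcases ih with ⟨ho, hn⟩ | ⟨m, ho, hm, h1, h2, hmax⟩
      · exact Or.inl ⟨ho, fun y hy => hn y ((hmemiff y).mp hy)⟩
      · exact Or.inr ⟨m, ho, (hmemiff m).mpr hm, h1, h2,
          fun y hy => hmax y ((hmemiff y).mp hy)⟩

-- folding the append-or-skip over a list whose per-element option agrees with g is a filterMap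
theorem pvFold_filterMap (F : Int → String) (f g : Int → Option Int) :
    ∀ (L : List Int), (∀ x ∈ L, f x = g x) → ∀ (init : List String),
    L.foldl (fun key x =>
        match f x with
        | some t => key ++ [F t]
        | none => key) init
      = init ++ L.filterMap (fun x => (g x).map F) := by
  intro L
  induction L with
  | nil => intro _ init; simp
  | cons a L ih =>
    intro h init
    have ha : f a = g a := h a (List.mem_cons_self)
    simp only [List.foldl_cons, List.filterMap_cons]
    rw [ha]
    cases hga : g a with
    | none =>
      simpa using ih (fun x hx => h x (List.mem_cons_of_mem a hx)) init
    | some t =>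
      rw [ih (fun x hx => h x (List.mem_cons_of_mem a hx)) (init ++ [F t])]
      simp

-- ===== VERDICT (by name: the statement is the Claim_ definition above) =====
theorem grid_cache_key_spec : Claim_equal_grid_cache_key := by
  intro grid max_y _
  unfold Spec_grid_cache_key grid_cache_key grid_cache_key_alt
  have hkey : ∀ x ∈ PySem.List.pyRange 0 7 1,
      pvAFind grid x (PySem.List.pyRange max_y 0 (-1)) = (pvColTop grid max_y).get? x := by
    intro x hx
    have hx' := (PySem.List.mem_pyRange_one).mp hx
    have ha : pvIsBest grid max_y x (pvAFind grid x (PySem.List.pyRange max_y 0 (-1))) := by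
      rcases pvAFind_best grid x max_y.toNat max_y rfl with ⟨ho, hn⟩ | ⟨m, ho, hm, h1, h2, hmax⟩
      · exact Or.inl ⟨ho, hn⟩
      · exact Or.inr ⟨m, ho, hm, h1, h2, hmax⟩
    exact pvIsBest_unique grid max_y x _ _ ha (pvColTop_best max_y x hx'.1 hx'.2 grid)
  rw [pvFold_filterMap (fun t => PySem.Int.toStr (max_y - t)) _ _ _ hkey []]
  simp
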